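-- pv_equiv track=rewrite | github.com/Anemistiras22/Spatial-Data | Assignment2_2.py | range_query
-- ===== SOURCE A (Python) =====
-- def rects_intersect(r1, r2):
--
--     # r1 & r2  (x_min, x_max, y_min, y_max)
--     x1_min, x1_max, y1_min, y1_max = r1
--     x2_min, x2_max, y2_min, y2_max = r2
--
--     #intersection
--     if x1_max < x2_min or x1_min > x2_max:
--         return False
--     if y1_max < y2_min or y1_min > y2_max:
--         return False
--
--     return True
--
-- def range_query(rtree, node_id, query_rect):
--     results = []
--     isnonleaf, entries = rtree[node_id]         # 0 = leaf, 1 = non-leaf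
--     for child_id, mbr in entries:
--         if rects_intersect(mbr, query_rect):  # if intersection
--             if isnonleaf:
--                 #continue recur
--                 results.extend(range_query(rtree, child_id, query_rect))
--             else:
--                 #append obj id
--                 results.append(child_id)
--
--     return results
-- ===== SOURCE B (Python) =====
-- def rects_intersect(r1, r2):
--     x1_min, x1_max, y1_min, y1_max = r1
--     x2_min, x2_max, y2_min, y2_max = r2
--     if x1_max < x2_min or x1_min > x2_max:
--         return False
--     if y1_max < y2_min or y1_min > y2_max:
--         return False
--     return True
--
-- def range_query(rtree, node_id, query_rect):
--     # iterative DFS with an explicit stack instead of recursion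
--     results = []
--     stack = [node_id]
--     while stack:
--         nid = stack.pop()
--         isnonleaf, entries = rtree[nid]
--         hits = [cid for cid, mbr in entries if rects_intersect(mbr, query_rect)]
--         if isnonleaf:
--             # push reversed so children are visited in left-to-right order
--             stack.extend(reversed(hits))
--         else:
--             results.extend(hits)
--     return results
-- ===== Notes on version B (the rewrite author's own statement) =====
-- stated objective: alternative
-- what changed: Recursive preorder traversal replaced by an iterative DFS with an explicit stack (children of a nonleaf pushed in reverse so leaf ids still come out in A's left-to-right preorder).
import Mathlib
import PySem

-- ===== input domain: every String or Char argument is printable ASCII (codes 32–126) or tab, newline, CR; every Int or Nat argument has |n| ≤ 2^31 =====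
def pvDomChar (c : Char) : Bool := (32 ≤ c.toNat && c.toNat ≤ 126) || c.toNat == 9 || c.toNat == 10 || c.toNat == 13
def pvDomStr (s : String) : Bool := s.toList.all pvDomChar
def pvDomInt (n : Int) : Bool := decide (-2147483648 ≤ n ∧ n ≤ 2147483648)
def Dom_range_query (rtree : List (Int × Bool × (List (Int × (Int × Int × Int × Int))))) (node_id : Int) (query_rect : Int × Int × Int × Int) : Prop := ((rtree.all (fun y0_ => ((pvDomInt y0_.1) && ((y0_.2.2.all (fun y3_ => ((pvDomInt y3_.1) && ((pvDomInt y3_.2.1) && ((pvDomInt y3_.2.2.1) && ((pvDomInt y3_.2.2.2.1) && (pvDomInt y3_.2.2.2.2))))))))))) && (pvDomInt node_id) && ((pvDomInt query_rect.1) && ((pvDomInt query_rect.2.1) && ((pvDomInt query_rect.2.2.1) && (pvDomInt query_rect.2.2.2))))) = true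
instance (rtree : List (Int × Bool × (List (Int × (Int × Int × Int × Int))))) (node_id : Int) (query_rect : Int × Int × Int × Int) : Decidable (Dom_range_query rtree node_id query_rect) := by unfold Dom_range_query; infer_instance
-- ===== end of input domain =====

-- B replaces A's recursive R-tree range query by an iterative DFS with an explicit stack; same results, same order.


-- ===== PORT A =====
-- rects_intersect, shared by both Pythons (B carries its own identical copy)
def pvRectsIntersect (r1 r2 : Int × Int × Int × Int) : Bool :=
  if r1.2.1 < r2.1 || r1.1 > r2.2.1 then false
  else if r1.2.2.2 < r2.2.2.1 || r1.2.2.1 > r2.2.2.2 then false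
  else true

-- number of distinct child ids occurring anywhere in the tree, plus one; used only to size the
-- fuel of the totalized recursions and the reachability iterations below
def pvU (rtree : List (Int × Bool × (List (Int × (Int × Int × Int × Int))))) : Finset Int :=
  (rtree.flatMap (fun e => e.2.2.map (·.1))).toFinset

def pvN (rtree : List (Int × Bool × (List (Int × (Int × Int × Int × Int))))) : Nat :=
  (pvU rtree).card + 1

-- A's recursion, totalized by a fuel parameter (inside Pre_ the recursion depth is bounded by the
-- number of distinct reachable nodes, ≤ pvN); rtree is Python's dict, lookup = first match
def rqA (rtree : List (Int × Bool × (List (Int × (Int × Int × Int × Int))))) (query_rect : Int × Int × Int × Int) : Nat → Int → List Int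
  | 0, _ => []
  | fuel+1, node_id =>
    match rtree.lookup node_id with
    | none => []   -- Python raises KeyError here; excluded by Pre_
    | some (isnonleaf, entries) =>
      entries.foldl (fun results e =>
        if pvRectsIntersect e.2 query_rect then
          if isnonleaf then results ++ rqA rtree query_rect fuel e.1
          else results ++ [e.1]
        else results) []

def range_query (rtree : List (Int × Bool × (List (Int × (Int × Int × Int × Int))))) (node_id : Int) (query_rect : Int × Int × Int × Int) : List Int :=
  rqA rtree query_rect (pvN rtree) node_id

-- ===== PORT B =====
-- maximum fan-out of any node, used only to size B's loop fuel
def pvMaxFanout (rtree : List (Int × Bool × (List (Int × (Int × Int × Int × Int))))) : Nat :=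
  rtree.foldl (fun m e => max m e.2.2.length) 0

-- B's while loop, totalized by fuel (one unit per pop; inside Pre_ the number of pops is bounded by
-- (pvMaxFanout+1)^pvN).  The stack's head is its top: Python pushes reversed(hits) and pops
-- from the end, which is the same as prepending hits here.
def rqB (rtree : List (Int × Bool × (List (Int × (Int × Int × Int × Int))))) (query_rect : Int × Int × Int × Int) : Nat → List Int → List Int → List Int
  | 0, _, results => results
  | _+1, [], results => results
  | fuel+1, nid :: stack, results =>
    match rtree.lookup nid with
    | none => results   -- Python raises KeyError here; excluded by Pre_
    | some (isnonleaf, entries) =>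
      let hits := (entries.filter (fun e => pvRectsIntersect e.2 query_rect)).map (·.1)
      if isnonleaf then rqB rtree query_rect fuel (hits ++ stack) results
      else rqB rtree query_rect fuel stack (results ++ hits)

def range_query_alt (rtree : List (Int × Bool × (List (Int × (Int × Int × Int × Int))))) (node_id : Int) (query_rect : Int × Int × Int × Int) : List Int :=
  rqB rtree query_rect ((pvMaxFanout rtree + 1) ^ pvN rtree + 1) [node_id] []

-- ===== PRECONDITION & SPEC =====
-- the child ids A follows out of node i: the intersecting entries of a nonleaf node that is a key
def pvChilds (rtree : List (Int × Bool × (List (Int × (Int × Int × Int × Int))))) (query_rect : Int × Int × Int × Int) (i : Int) : List Int :=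
  match rtree.lookup i with
  | some (true, es) => (es.filter (fun e => pvRectsIntersect e.2 query_rect)).map (·.1)
  | _ => []

def pvStep (rtree : List (Int × Bool × (List (Int × (Int × Int × Int × Int))))) (query_rect : Int × Int × Int × Int) (S : Finset Int) : Finset Int :=
  S ∪ S.biUnion (fun i => (pvChilds rtree query_rect i).toFinset)

-- the nodes A visits: closure of {node_id} under followed edges (pvN iterations reach the fixpoint)
def pvReach (rtree : List (Int × Bool × (List (Int × (Int × Int × Int × Int))))) (query_rect : Int × Int × Int × Int) (node_id : Int) : Finset Int :=
  (pvStep rtree query_rect)^[pvN rtree] {node_id}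

-- the strict descendants of i along followed edges
def pvDesc (rtree : List (Int × Bool × (List (Int × (Int × Int × Int × Int))))) (query_rect : Int × Int × Int × Int) (i : Int) : Finset Int :=
  (pvStep rtree query_rect)^[pvN rtree] (pvChilds rtree query_rect i).toFinset

-- Pre_ holds exactly when A returns: every node reachable from node_id along intersecting nonleaf
-- edges is a key of the dict (otherwise Python raises KeyError) and no reachable node is its own
-- descendant along such edges (otherwise A recurses forever / raises RecursionError).
def Pre_range_query (rtree : List (Int × Bool × (List (Int × (Int × Int × Int × Int))))) (node_id : Int) (query_rect : Int × Int × Int × Int) : Prop :=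
  ∀ i ∈ pvReach rtree query_rect node_id,
    (rtree.lookup i).isSome = true ∧ i ∉ pvDesc rtree query_rect i
instance (rtree : List (Int × Bool × (List (Int × (Int × Int × Int × Int))))) (node_id : Int) (query_rect : Int × Int × Int × Int) : Decidable (Pre_range_query rtree node_id query_rect) := by unfold Pre_range_query; infer_instance

def pvWitness_range_query : (List (Int × Bool × (List (Int × (Int × Int × Int × Int))))) × Int × (Int × Int × Int × Int) :=
  ([(1, true, [(0, (0, 10, 0, 10))]), (0, false, [(7, (0, 5, 0, 5))])], 1, (0, 10, 0, 10))

def Spec_range_query (rtree : List (Int × Bool × (List (Int × (Int × Int × Int × Int))))) (node_id : Int) (query_rect : Int × Int × Int × Int) (out : List Int) : Prop := out = range_query_alt rtree node_id query_rect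
instance (rtree : List (Int × Bool × (List (Int × (Int × Int × Int × Int))))) (node_id : Int) (query_rect : Int × Int × Int × Int) (out : List Int) : Decidable (Spec_range_query rtree node_id query_rect out) := by unfold Spec_range_query; infer_instance

-- ===== CLAIM (what is proved, stated in full; the proofs are below) =====
def Claim_equal_range_query : Prop := ∀ (rtree : List (Int × Bool × (List (Int × (Int × Int × Int × Int))))) (node_id : Int) (query_rect : Int × Int × Int × Int), Dom_range_query rtree node_id query_rect → Pre_range_query rtree node_id query_rect → Spec_range_query rtree node_id query_rect (range_query rtree node_id query_rect)

-- ===== LEMMAS AND PROOFS =====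

theorem lookup_mem {α β : Type} [BEq α] [LawfulBEq α] {l : List (α × β)} {a : α} {v : β}
    (h : l.lookup a = some v) : (a, v) ∈ l := by
  induction l with
  | nil => simp [List.lookup] at h
  | cons p rest ih =>
    obtain ⟨k, b⟩ := p
    rw [List.lookup_cons] at h
    by_cases hb : a == k
    · have hk : k = a := (eq_of_beq hb).symm
      simp [hb] at h
      subst hk; subst h; exact List.mem_cons_self ..
    · rw [Bool.not_eq_true] at hb
      simp [hb] at h
      exact List.mem_cons_of_mem _ (ih h)

-- ---- generic facts about iterating an inflationary step whose new elements come from a fixed U ----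

theorem pvStep_incl (rtree : List (Int × Bool × (List (Int × (Int × Int × Int × Int))))) (query_rect : Int × Int × Int × Int) (S : Finset Int) :
    S ⊆ pvStep rtree query_rect S := Finset.subset_union_left

theorem pvStep_mono (rtree : List (Int × Bool × (List (Int × (Int × Int × Int × Int))))) (query_rect : Int × Int × Int × Int) {S T : Finset Int}
    (h : S ⊆ T) : pvStep rtree query_rect S ⊆ pvStep rtree query_rect T :=
  Finset.union_subset_union h (Finset.biUnion_subset_biUnion_of_subset_left _ h)

theorem childs_subset_U (rtree : List (Int × Bool × (List (Int × (Int × Int × Int × Int))))) (query_rect : Int × Int × Int × Int) (i : Int) :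
    ∀ c ∈ pvChilds rtree query_rect i, c ∈ pvU rtree := by
  intro c hc
  unfold pvChilds at hc
  cases hv : rtree.lookup i with
  | none => rw [hv] at hc; simp at hc
  | some p =>
    obtain ⟨b, es⟩ := p
    cases b with
    | false => rw [hv] at hc; simp at hc
    | true =>
      rw [hv] at hc
      rcases List.mem_map.mp hc with ⟨e, he, hce⟩
      have hes : (i, true, es) ∈ rtree := lookup_mem hv
      unfold pvU
      rw [List.mem_toFinset]
      exact List.mem_flatMap.mpr ⟨(i, true, es), hes,
        List.mem_map.mpr ⟨e, List.mem_of_mem_filter he, hce⟩⟩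

theorem pvStep_in_U (rtree : List (Int × Bool × (List (Int × (Int × Int × Int × Int))))) (query_rect : Int × Int × Int × Int) (S : Finset Int) :
    pvStep rtree query_rect S ⊆ S ∪ pvU rtree := by
  unfold pvStep
  apply Finset.union_subset Finset.subset_union_left
  intro x hx
  rcases Finset.mem_biUnion.mp hx with ⟨i, _, hxi⟩
  exact Finset.mem_union_right _ (childs_subset_U rtree query_rect i x (List.mem_toFinset.mp hxi))

theorem fix_persists {f : Finset Int → Finset Int} {S : Finset Int} (h : f S = S) :
    ∀ k, f^[k] S = S := by
  intro k; induction k with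
  | zero => rfl
  | succ k ih => rw [Function.iterate_succ', Function.comp_apply, ih, h]

theorem iterate_incl {f : Finset Int → Finset Int} (hincl : ∀ S, S ⊆ f S) :
    ∀ (k : Nat) (S : Finset Int), S ⊆ f^[k] S := by
  intro k
  induction k with
  | zero => intro S; simp
  | succ k ih =>
    intro S
    rw [Function.iterate_succ', Function.comp_apply]
    exact (ih S).trans (hincl _)

theorem iterate_in_U {f : Finset Int → Finset Int} {U : Finset Int}
    (hU : ∀ S, f S ⊆ S ∪ U) :
    ∀ (k : Nat) (S : Finset Int), S ⊆ U → f^[k] S ⊆ U := by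
  intro k
  induction k with
  | zero => intro S h; simpa using h
  | succ k ih =>
    intro S h
    rw [Function.iterate_succ', Function.comp_apply]
    exact (hU _).trans (Finset.union_subset (ih S h) (subset_refl U))

theorem iterate_reaches_fix {f : Finset Int → Finset Int} (U : Finset Int)
    (hincl : ∀ S, S ⊆ f S) (hU : ∀ S, f S ⊆ S ∪ U) (S0 : Finset Int) :
    f (f^[U.card + 1] S0) = f^[U.card + 1] S0 := by
  by_cases hex : ∃ k ≤ U.card + 1, f (f^[k] S0) = f^[k] S0
  · obtain ⟨k, hk, hfix⟩ := hex
    have heq : f^[U.card + 1] S0 = f^[k] S0 := by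
      have h1 : (U.card + 1 - k) + k = U.card + 1 := by omega
      calc f^[U.card + 1] S0 = f^[(U.card + 1 - k) + k] S0 := by rw [h1]
        _ = f^[U.card + 1 - k] (f^[k] S0) := Function.iterate_add_apply f _ k S0
        _ = f^[k] S0 := fix_persists hfix _
    rw [heq, hfix]
  · exfalso
    push Not at hex
    have grow : ∀ k, k ≤ U.card + 1 → k ≤ ((f^[k] S0) ∩ U).card := by
      intro k
      induction k with
      | zero => intro _; simp
      | succ k ih =>
        intro hk
        have hk' := ih (by omega)
        have hnf := hex k (by omega)
        have hss : f^[k] S0 ⊂ f (f^[k] S0) :=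
          (Finset.ssubset_iff_of_subset (hincl _)).mpr
            (by
              by_contra hno
              push Not at hno
              exact hnf (Finset.Subset.antisymm (fun x hx => by
                by_contra hxn
                exact hxn (hno x hx) |>.elim) (hincl _)))
        obtain ⟨x, hxf, hxn⟩ := Finset.exists_of_ssubset hss
        have hxU : x ∈ U := by
          rcases Finset.mem_union.mp (hU (f^[k] S0) hxf) with h | h
          · exact absurd h hxn
          · exact h
        have hsub : (f^[k] S0) ∩ U ⊆ (f^[k+1] S0) ∩ U := by
          rw [Function.iterate_succ', Function.comp_apply]
          exact Finset.inter_subset_inter (hincl _) (subset_refl U)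
        have hxin : x ∈ (f^[k+1] S0) ∩ U := by
          rw [Function.iterate_succ', Function.comp_apply]
          exact Finset.mem_inter.mpr ⟨hxf, hxU⟩
        have hlt : ((f^[k] S0) ∩ U).card < ((f^[k+1] S0) ∩ U).card := by
          apply Finset.card_lt_card
          refine ⟨hsub, fun hc => hxn ?_⟩
          exact (Finset.mem_inter.mp (hc hxin)).1
        omega
    have h1 := grow (U.card + 1) le_rfl
    have h2 : ((f^[U.card + 1] S0) ∩ U).card ≤ U.card :=
      Finset.card_le_card Finset.inter_subset_right
    omega

-- ---- instantiations to pvReach / pvDesc ----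

theorem reach_fix (rtree : List (Int × Bool × (List (Int × (Int × Int × Int × Int))))) (query_rect : Int × Int × Int × Int) (node_id : Int) :
    pvStep rtree query_rect (pvReach rtree query_rect node_id) = pvReach rtree query_rect node_id :=
  iterate_reaches_fix (pvU rtree) (pvStep_incl rtree query_rect) (pvStep_in_U rtree query_rect) _

theorem desc_fix (rtree : List (Int × Bool × (List (Int × (Int × Int × Int × Int))))) (query_rect : Int × Int × Int × Int) (i : Int) :
    pvStep rtree query_rect (pvDesc rtree query_rect i) = pvDesc rtree query_rect i :=
  iterate_reaches_fix (pvU rtree) (pvStep_incl rtree query_rect) (pvStep_in_U rtree query_rect) _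

theorem step_closed {rtree : List (Int × Bool × (List (Int × (Int × Int × Int × Int))))} {query_rect : Int × Int × Int × Int} {S : Finset Int}
    (hfix : pvStep rtree query_rect S = S) {i : Int} (hi : i ∈ S) :
    ∀ c ∈ pvChilds rtree query_rect i, c ∈ S := by
  intro c hc
  rw [← hfix]
  exact Finset.mem_union_right _
    (Finset.mem_biUnion.mpr ⟨i, hi, List.mem_toFinset.mpr hc⟩)

theorem node_mem_reach (rtree : List (Int × Bool × (List (Int × (Int × Int × Int × Int))))) (query_rect : Int × Int × Int × Int) (node_id : Int) :
    node_id ∈ pvReach rtree query_rect node_id :=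
  iterate_incl (pvStep_incl rtree query_rect) (pvN rtree) {node_id} (Finset.mem_singleton_self _)

theorem reach_closed {rtree : List (Int × Bool × (List (Int × (Int × Int × Int × Int))))} {query_rect : Int × Int × Int × Int} {node_id i : Int}
    (hi : i ∈ pvReach rtree query_rect node_id) :
    ∀ c ∈ pvChilds rtree query_rect i, c ∈ pvReach rtree query_rect node_id :=
  step_closed (reach_fix rtree query_rect node_id) hi

theorem child_mem_desc {rtree : List (Int × Bool × (List (Int × (Int × Int × Int × Int))))} {query_rect : Int × Int × Int × Int} {i c : Int}
    (hc : c ∈ pvChilds rtree query_rect i) : c ∈ pvDesc rtree query_rect i :=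
  iterate_incl (pvStep_incl rtree query_rect) (pvN rtree) _ (List.mem_toFinset.mpr hc)

theorem iterate_subset_fix {rtree : List (Int × Bool × (List (Int × (Int × Int × Int × Int))))} {query_rect : Int × Int × Int × Int} {D : Finset Int}
    (hfix : pvStep rtree query_rect D = D) :
    ∀ (k : Nat) (S : Finset Int), S ⊆ D → (pvStep rtree query_rect)^[k] S ⊆ D := by
  intro k
  induction k with
  | zero => intro S h; simpa using h
  | succ k ih =>
    intro S h
    rw [Function.iterate_succ', Function.comp_apply]
    exact (pvStep_mono rtree query_rect (ih S h)).trans (le_of_eq hfix)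

theorem desc_child_subset {rtree : List (Int × Bool × (List (Int × (Int × Int × Int × Int))))} {query_rect : Int × Int × Int × Int} {i c : Int}
    (hc : c ∈ pvChilds rtree query_rect i) :
    pvDesc rtree query_rect c ⊆ pvDesc rtree query_rect i := by
  apply iterate_subset_fix (desc_fix rtree query_rect i)
  intro x hx
  exact step_closed (desc_fix rtree query_rect i) (child_mem_desc hc) x (List.mem_toFinset.mp hx)

-- the rank that makes A's recursion and B's loop well-founded inside Pre_
def pvRank (rtree : List (Int × Bool × (List (Int × (Int × Int × Int × Int))))) (query_rect : Int × Int × Int × Int) (i : Int) : Nat :=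
  (pvDesc rtree query_rect i).card

theorem rank_lt {rtree : List (Int × Bool × (List (Int × (Int × Int × Int × Int))))} {query_rect : Int × Int × Int × Int} {i c : Int}
    (hc : c ∈ pvChilds rtree query_rect i) (hacyc : c ∉ pvDesc rtree query_rect c) :
    pvRank rtree query_rect c < pvRank rtree query_rect i := by
  apply Finset.card_lt_card
  exact ⟨desc_child_subset hc, fun hsub => hacyc (hsub (child_mem_desc hc))⟩

theorem rank_lt_N (rtree : List (Int × Bool × (List (Int × (Int × Int × Int × Int))))) (query_rect : Int × Int × Int × Int) (i : Int) :
    pvRank rtree query_rect i < pvN rtree := by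
  have hsub : pvDesc rtree query_rect i ⊆ pvU rtree := by
    apply iterate_in_U (pvStep_in_U rtree query_rect)
    intro x hx
    exact childs_subset_U rtree query_rect i x (List.mem_toFinset.mp hx)
  have := Finset.card_le_card hsub
  unfold pvRank pvN
  omega

-- ---- shared description of A's recursion with fuel = rank + 1 ----

def pvRQ (rtree : List (Int × Bool × (List (Int × (Int × Int × Int × Int))))) (query_rect : Int × Int × Int × Int) (i : Int) : List Int :=
  rqA rtree query_rect (pvRank rtree query_rect i + 1) i

theorem childs_of_lookup {rtree : List (Int × Bool × (List (Int × (Int × Int × Int × Int))))} {query_rect : Int × Int × Int × Int} {i : Int}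
    {entries : List (Int × (Int × Int × Int × Int))}
    (hv : rtree.lookup i = some (true, entries)) :
    pvChilds rtree query_rect i
      = (entries.filter (fun e => pvRectsIntersect e.2 query_rect)).map (·.1) := by
  unfold pvChilds
  rw [hv]

theorem foldl_max_init {α : Type} (f : α → Nat) :
    ∀ (l : List α) (m : Nat), m ≤ l.foldl (fun acc e => max acc (f e)) m := by
  intro l
  induction l with
  | nil => intro m; simp
  | cons x xs ih =>
    intro m
    exact le_trans (Nat.le_max_left m (f x)) (ih (max m (f x)))

theorem foldl_max_mem {α : Type} (f : α → Nat) :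
    ∀ (l : List α) (m : Nat) (e : α), e ∈ l → f e ≤ l.foldl (fun acc e => max acc (f e)) m := by
  intro l
  induction l with
  | nil => intro m e he; simp at he
  | cons x xs ih =>
    intro m e he
    rcases List.mem_cons.mp he with h | h
    · subst h
      exact le_trans (Nat.le_max_right m (f e)) (foldl_max_init f xs (max m (f e)))
    · exact ih (max m (f x)) e h

theorem fanout_le {rtree : List (Int × Bool × (List (Int × (Int × Int × Int × Int))))}
    {e : Int × Bool × (List (Int × (Int × Int × Int × Int)))} (h : e ∈ rtree) :
    e.2.2.length ≤ pvMaxFanout rtree := by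
  unfold pvMaxFanout
  exact foldl_max_mem (fun e => e.2.2.length) rtree 0 e h

-- A's result is independent of the fuel, as long as it exceeds the rank
theorem rqA_fuel {rtree : List (Int × Bool × (List (Int × (Int × Int × Int × Int))))}
    {query_rect : Int × Int × Int × Int} {node_id : Int}
    (hpre : Pre_range_query rtree node_id query_rect) :
    ∀ f : Nat, ∀ i : Int, i ∈ pvReach rtree query_rect node_id →
      pvRank rtree query_rect i < f →
      rqA rtree query_rect f i = pvRQ rtree query_rect i := by
  intro f
  induction f using Nat.strong_induction_on with
  | _ f IH =>
    intro i hreach hrank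
    cases f with
    | zero => omega
    | succ f' =>
      have hkey := (hpre i hreach).1
      rcases Option.isSome_iff_exists.mp hkey with ⟨⟨b, entries⟩, hv⟩
      unfold pvRQ
      simp only [rqA, hv]
      apply PySem.List.foldl_congr_mem
      intro acc e he
      by_cases hint : pvRectsIntersect e.2 query_rect
      · simp only [hint, if_true]
        cases b with
        | false => rfl
        | true =>
          have hcc : e.1 ∈ pvChilds rtree query_rect i := by
            rw [childs_of_lookup hv]
            exact List.mem_map.mpr ⟨e, List.mem_filter.mpr ⟨he, hint⟩, rfl⟩
          have hcr : e.1 ∈ pvReach rtree query_rect node_id := reach_closed hreach _ hcc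
          have hrk : pvRank rtree query_rect e.1 < pvRank rtree query_rect i :=
            rank_lt hcc (hpre _ hcr).2
          simp only [if_true]
          rw [IH f' (Nat.lt_succ_self _) e.1 hcr (by omega),
              IH (pvRank rtree query_rect i) (by omega) e.1 hcr hrk]
      · simp [hint]

-- the foldl loop shape of A's nonleaf body
theorem foldl_extend_shape {α : Type} (p : α → Bool) (g : α → List Int) :
    ∀ (l : List α) (init : List Int),
      l.foldl (fun acc e => if p e then acc ++ g e else acc) init
        = init ++ (l.filter p).flatMap g := by
  intro l
  induction l with
  | nil => simp
  | cons x xs ih =>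
    intro init
    by_cases hp : p x <;> simp [List.foldl_cons, hp, ih, List.append_assoc]

-- the potential of B's stack: enough fuel for everything it will still pop
def pvMu (rtree : List (Int × Bool × (List (Int × (Int × Int × Int × Int))))) (query_rect : Int × Int × Int × Int) (s : List Int) : Nat :=
  (s.map (fun i => (pvMaxFanout rtree + 1) ^ pvRank rtree query_rect i)).sum

-- B's loop computes the concatenation of A's answers over the stack
theorem rqB_spec {rtree : List (Int × Bool × (List (Int × (Int × Int × Int × Int))))}
    {query_rect : Int × Int × Int × Int} {node_id : Int}
    (hpre : Pre_range_query rtree node_id query_rect) :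
    ∀ fuel : Nat, ∀ s results : List Int,
      (∀ i ∈ s, i ∈ pvReach rtree query_rect node_id) →
      pvMu rtree query_rect s ≤ fuel →
      rqB rtree query_rect fuel s results = results ++ s.flatMap (pvRQ rtree query_rect) := by
  intro fuel
  induction fuel with
  | zero =>
    intro s results hks hmu
    cases s with
    | nil => simp [rqB]
    | cons i rest =>
      exfalso
      simp [pvMu] at hmu
  | succ fuel IH =>
    intro s results hks hmu
    cases s with
    | nil => simp [rqB]
    | cons i rest =>
      have hreach := hks i (List.mem_cons_self ..)
      have hkey := (hpre i hreach).1
      rcases Option.isSome_iff_exists.mp hkey with ⟨⟨b, entries⟩, hv⟩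
      have hrest : ∀ j ∈ rest, j ∈ pvReach rtree query_rect node_id :=
        fun j hj => hks j (List.mem_cons_of_mem _ hj)
      have hone : 1 ≤ (pvMaxFanout rtree + 1) ^ pvRank rtree query_rect i :=
        Nat.one_le_pow _ _ (Nat.succ_pos _)
      have hmu' : (pvMaxFanout rtree + 1) ^ pvRank rtree query_rect i
          + pvMu rtree query_rect rest ≤ fuel + 1 := by
        simpa [pvMu] using hmu
      simp only [rqB, hv]
      cases b with
      | false =>
        rw [IH rest (results ++ (entries.filter (fun e => pvRectsIntersect e.2 query_rect)).map (·.1))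
            hrest (by omega)]
        have hRQ : pvRQ rtree query_rect i
            = (entries.filter (fun e => pvRectsIntersect e.2 query_rect)).map (·.1) := by
          unfold pvRQ
          simp only [rqA, hv, Bool.false_eq_true, if_false]
          simpa using PySem.List.foldl_append_if
            (fun e => pvRectsIntersect e.2 query_rect) (fun e : Int × (Int × Int × Int × Int) => e.1)
            entries []
        simp [hRQ]
      | true =>
        have hmem : (i, true, entries) ∈ rtree := lookup_mem hv
        have hchilds : pvChilds rtree query_rect i
            = (entries.filter (fun e => pvRectsIntersect e.2 query_rect)).map (·.1) :=
          childs_of_lookup hv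
        have hhit : ∀ c ∈ (entries.filter (fun e => pvRectsIntersect e.2 query_rect)).map (·.1),
            c ∈ pvReach rtree query_rect node_id := by
          intro c hc
          exact reach_closed hreach c (by rw [hchilds]; exact hc)
        have hkeys : ∀ j ∈ (entries.filter (fun e => pvRectsIntersect e.2 query_rect)).map (·.1) ++ rest,
            j ∈ pvReach rtree query_rect node_id := by
          intro j hj
          rcases List.mem_append.mp hj with h | h
          · exact hhit j h
          · exact hrest j h
        have hrklt : ∀ c ∈ (entries.filter (fun e => pvRectsIntersect e.2 query_rect)).map (·.1),
            pvRank rtree query_rect c < pvRank rtree query_rect i := by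
          intro c hc
          have hcc : c ∈ pvChilds rtree query_rect i := by rw [hchilds]; exact hc
          exact rank_lt hcc (hpre c (hhit c hc)).2
        have hmuh : pvMu rtree query_rect ((entries.filter (fun e => pvRectsIntersect e.2 query_rect)).map (·.1))
            + 1 ≤ (pvMaxFanout rtree + 1) ^ pvRank rtree query_rect i := by
          cases hr : pvRank rtree query_rect i with
          | zero =>
            have hnil : (entries.filter (fun e => pvRectsIntersect e.2 query_rect)).map (·.1) = [] := by
              by_contra hne
              rcases List.exists_mem_of_ne_nil _ hne with ⟨c, hc⟩
              have := hrklt c hc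
              omega
            simp [hnil, pvMu]
          | succ r =>
            set hits := (entries.filter (fun e => pvRectsIntersect e.2 query_rect)).map (·.1) with hhits
            have hlen : hits.length ≤ pvMaxFanout rtree := by
              calc hits.length = (entries.filter (fun e => pvRectsIntersect e.2 query_rect)).length :=
                    List.length_map ..
                _ ≤ entries.length := List.length_filter_le _ _
                _ ≤ pvMaxFanout rtree := fanout_le hmem
            have hbound : ∀ x ∈ hits.map (fun j => (pvMaxFanout rtree + 1) ^ pvRank rtree query_rect j),
                x ≤ (pvMaxFanout rtree + 1) ^ r := by
              intro x hx
              rcases List.mem_map.mp hx with ⟨j, hj, hxj⟩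
              have hjr := hrklt j hj
              subst hxj
              exact Nat.pow_le_pow_right (Nat.succ_le_succ (Nat.zero_le _)) (by omega)
            have hsum : (hits.map (fun j => (pvMaxFanout rtree + 1) ^ pvRank rtree query_rect j)).sum
                ≤ hits.length * (pvMaxFanout rtree + 1) ^ r := by
              have := List.sum_le_card_nsmul
                (hits.map (fun j => (pvMaxFanout rtree + 1) ^ pvRank rtree query_rect j))
                ((pvMaxFanout rtree + 1) ^ r) hbound
              simpa [smul_eq_mul] using this
            have hX : 1 ≤ (pvMaxFanout rtree + 1) ^ r := Nat.one_le_pow _ _ (Nat.succ_pos _)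
            have hmul : hits.length * (pvMaxFanout rtree + 1) ^ r
                ≤ pvMaxFanout rtree * (pvMaxFanout rtree + 1) ^ r :=
              Nat.mul_le_mul_right _ hlen
            have hpow : (pvMaxFanout rtree + 1) ^ (r + 1)
                = pvMaxFanout rtree * (pvMaxFanout rtree + 1) ^ r + (pvMaxFanout rtree + 1) ^ r := by
              rw [pow_succ]; ring
            unfold pvMu
            omega
        rw [IH _ results hkeys (by
          have : pvMu rtree query_rect ((entries.filter (fun e => pvRectsIntersect e.2 query_rect)).map (·.1) ++ rest)
              = pvMu rtree query_rect ((entries.filter (fun e => pvRectsIntersect e.2 query_rect)).map (·.1))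
                + pvMu rtree query_rect rest := by
            simp [pvMu]
          omega)]
        have hRQ : pvRQ rtree query_rect i
            = ((entries.filter (fun e => pvRectsIntersect e.2 query_rect)).map (·.1)).flatMap
                (pvRQ rtree query_rect) := by
          unfold pvRQ
          simp only [rqA, hv, if_true]
          rw [foldl_extend_shape (fun e => pvRectsIntersect e.2 query_rect)
              (fun e => rqA rtree query_rect (pvRank rtree query_rect i) e.1) entries []]
          rw [List.flatMap_map]
          refine (List.nil_append _) ▸ List.flatMap_congr ?_
          intro e he
          rcases List.mem_filter.mp he with ⟨hem, hep⟩
          have hcc : e.1 ∈ pvChilds rtree query_rect i := by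
            rw [hchilds]
            exact List.mem_map.mpr ⟨e, List.mem_filter.mpr ⟨hem, hep⟩, rfl⟩
          have hcr := reach_closed hreach _ hcc
          exact rqA_fuel hpre (pvRank rtree query_rect i) e.1 hcr
            (rank_lt hcc (hpre _ hcr).2)
        simp [hRQ]

-- ===== VERDICT (by name: the statement is the Claim_ definition above) =====
theorem range_query_spec : Claim_equal_range_query := by
  intro rtree node_id query_rect _ hpre
  unfold Spec_range_query range_query range_query_alt
  have hnr := node_mem_reach rtree query_rect node_id
  rw [rqA_fuel hpre _ _ hnr (rank_lt_N rtree query_rect node_id)]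
  rw [rqB_spec hpre _ _ _ (by intro i hi; simp at hi; subst hi; exact hnr)
      (by
        unfold pvMu
        simp only [List.map_cons, List.map_nil, List.sum_cons, List.sum_nil, Nat.add_zero]
        calc (pvMaxFanout rtree + 1) ^ pvRank rtree query_rect node_id
            ≤ (pvMaxFanout rtree + 1) ^ pvN rtree :=
              Nat.pow_le_pow_right (Nat.succ_le_succ (Nat.zero_le _))
                (le_of_lt (rank_lt_N rtree query_rect node_id))
          _ ≤ (pvMaxFanout rtree + 1) ^ pvN rtree + 1 := Nat.le_succ _)]
  simp
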